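-- pv_equiv track=rewrite | github.com/Timsbim/AoC | 2021/day_19.py | span_graph
-- ===== SOURCE A (Python) =====
-- def span_graph(graph):
--     result = []
--     start = min(graph.keys())
--     paths = [[start]]
--     while paths:
--         path = paths.pop()
--         stop = True
--         for node in graph[path[-1]]:
--             if node not in path:
--                 paths.append(path + [node])
--                 stop = False
--         if stop:
--             result.append(path)
--     return result
-- ===== SOURCE B (Python) =====
-- def span_graph(graph):
--     result = []
--
--     def dfs(path):
--         maximal = True
--         for node in reversed(graph[path[-1]]):
--             if node not in path:
--                 maximal = False
--                 dfs(path + [node])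
--         if maximal:
--             result.append(path)
--
--     dfs([min(graph.keys())])
--     return result
-- ===== Notes on version B (the rewrite author's own statement) =====
-- stated objective: alternative
-- what changed: Replaces the explicit LIFO stack of pending paths with a recursive depth-first helper that iterates neighbours in reversed order and appends a path when no fresh neighbour exists, producing the maximal simple paths in the same order.
import Mathlib
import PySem

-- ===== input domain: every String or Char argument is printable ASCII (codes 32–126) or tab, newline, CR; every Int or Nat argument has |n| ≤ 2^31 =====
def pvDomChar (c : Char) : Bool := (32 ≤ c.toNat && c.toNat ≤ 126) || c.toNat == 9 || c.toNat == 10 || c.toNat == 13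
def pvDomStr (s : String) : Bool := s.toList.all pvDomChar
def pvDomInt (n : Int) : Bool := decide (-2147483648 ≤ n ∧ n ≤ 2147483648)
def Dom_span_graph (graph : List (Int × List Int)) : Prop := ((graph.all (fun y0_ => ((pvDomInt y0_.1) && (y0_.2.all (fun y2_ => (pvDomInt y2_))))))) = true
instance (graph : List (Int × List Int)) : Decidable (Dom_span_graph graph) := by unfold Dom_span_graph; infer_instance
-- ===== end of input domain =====

-- B replaces A's explicit stack of pending paths by a recursive DFS helper (same output order);
-- objective: alternative decomposition, equal cost.
-- Both ports carry a fuel counter, consumed once per visited path, purely as a totality guard: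
-- pvFuel exceeds the number of simple paths in any graph, so it never runs out.

-- ===== PORT A =====
def pvFuel (graph : List (Int × List Int)) : Nat :=
  (graph.length + (graph.map (fun p => p.2.length)).sum + 2) ^
    (graph.length + (graph.map (fun p => p.2.length)).sum + 2)

def pvALoop (graph : List (Int × List Int)) :
    Nat → List (List Int) → List (List Int) → List (List Int)
  | 0, _, res => res
  | f+1, paths, res =>
    match PySem.List.pop? paths (-1) with          -- path = paths.pop()
    | none => res                                   -- while paths: loop exits
    | some (path, rest) =>
      match PySem.List.pyGet? path (-1) with        -- path[-1]
      | none => pvALoop graph f rest res            -- unreachable: paths on the stack are nonempty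
      | some last =>
        match (PySem.Dict.mk graph).get? last with  -- graph[path[-1]]
        | none => pvALoop graph f rest res          -- KeyError in Python: outside Pre_
        | some nbrs =>
          let st := nbrs.foldl                      -- for node in graph[path[-1]]: ...
            (fun (st : List (List Int) × Bool) node =>
              if node ∈ path then st else (st.1 ++ [path ++ [node]], false))
            ([], true)
          pvALoop graph f (rest ++ st.1) (if st.2 then res ++ [path] else res)

def span_graph (graph : List (Int × List Int)) : List (List Int) :=
  match PySem.List.min? (PySem.Dict.keys (PySem.Dict.mk graph)) (fun x => x) with
  | none => []                                      -- min() on empty: ValueError, outside Pre_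
  | some start => pvALoop graph (pvFuel graph) [[start]] []

-- ===== PORT B =====
-- pvDfs = Source B's dfs(path); pvVisit is its for-loop over reversed(graph[path[-1]]).
-- The fuel is threaded through the recursion (one unit per dfs call); 'min r.1 f' only
-- justifies termination — the returned fuel is always ≤ the argument, so min is the identity.
mutual
def pvDfs (graph : List (Int × List Int)) :
    Nat → List Int → List (List Int) → Nat × List (List Int)
  | 0, _, res => (0, res)
  | f+1, path, res =>
    match PySem.List.pyGet? path (-1) with          -- path[-1]
    | none => (f, res)                              -- unreachable: dfs is called on nonempty paths
    | some last =>
      match (PySem.Dict.mk graph).get? last with    -- graph[path[-1]]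
      | none => (f, res)                            -- KeyError in Python: outside Pre_
      | some nbrs =>
        let t := pvVisit graph f path nbrs.reverse res true
        (t.1, if t.2.2 then t.2.1 ++ [path] else t.2.1)
  termination_by f _ _ => (f, 0)
  decreasing_by exact Prod.Lex.left _ _ (Nat.lt_succ_self f)

def pvVisit (graph : List (Int × List Int)) :
    Nat → List Int → List Int → List (List Int) → Bool → Nat × List (List Int) × Bool
  | f, _, [], res, maximal => (f, res, maximal)
  | f, path, n :: ns, res, maximal =>
    if n ∈ path then pvVisit graph f path ns res maximal
    else
      let r := pvDfs graph f (path ++ [n]) res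
      pvVisit graph (min r.1 f) path ns r.2 false
  termination_by f _ ns _ _ => (f, ns.length + 1)
  decreasing_by
  · rw [Prod.lex_def]; simp
  · rw [Prod.lex_def]; simp
  · rw [Prod.lex_def]; simp; omega
end

def span_graph_alt (graph : List (Int × List Int)) : List (List Int) :=
  match PySem.List.min? (PySem.Dict.keys (PySem.Dict.mk graph)) (fun x => x) with
  | none => []                                      -- min() on empty: ValueError, outside Pre_
  | some start => (pvDfs graph (pvFuel graph) [start] []).2

-- ===== PRECONDITION & SPEC =====
-- A raises KeyError exactly when some node reachable from the minimal key (through keys) is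
-- itself not a key, and ValueError on the empty dict; Pre_ excludes exactly those inputs.
-- pvReach is a plain breadth-first closure (no paths): NOT a re-simulation of either port.
def pvReachStep (graph : List (Int × List Int)) (s : List Int) : List Int :=
  graph.foldl (fun acc kv =>
    if kv.1 ∈ s then kv.2.foldl (fun a n => if n ∈ a then a else a ++ [n]) acc else acc) s

def pvReach (graph : List (Int × List Int)) : List Int :=
  match PySem.List.min? (graph.map (fun p => p.1)) (fun x => x) with
  | none => []
  | some start => (pvReachStep graph)^[graph.length + 1] [start]

def Pre_span_graph (graph : List (Int × List Int)) : Prop :=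
  graph ≠ [] ∧ ∀ v ∈ pvReach graph, v ∈ graph.map (fun p => p.1)

instance (graph : List (Int × List Int)) : Decidable (Pre_span_graph graph) := by
  unfold Pre_span_graph; infer_instance

def pvWitness_span_graph : (List (Int × List Int)) := [(0, [1, 2]), (1, [0, 2]), (2, [0])]

def Spec_span_graph (graph : List (Int × List Int)) (out : List (List Int)) : Prop := out = span_graph_alt graph
instance (graph : List (Int × List Int)) (out : List (List Int)) : Decidable (Spec_span_graph graph out) := by unfold Spec_span_graph; infer_instance

-- ===== CLAIM (what is proved, stated in full; the proofs are below) =====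
def Claim_equal_span_graph : Prop := ∀ (graph : List (Int × List Int)), Dom_span_graph graph → Pre_span_graph graph → Spec_span_graph graph (span_graph graph)

-- ===== LEMMAS AND PROOFS =====

-- the extensions A pushes for a popped path p with neighbour list ns, in push order
def pvExts (p : List Int) (ns : List Int) : List (List Int) :=
  (ns.filter (fun n => n ∉ p)).map (fun n => p ++ [n])

lemma pvAfold_eq (p : List Int) (ns : List Int) :
    ∀ acc b, ns.foldl
      (fun (st : List (List Int) × Bool) node =>
        if node ∈ p then st else (st.1 ++ [p ++ [node]], false)) (acc, b)
      = (acc ++ pvExts p ns, b && ns.all (· ∈ p)) := by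
  induction ns with
  | nil => intro acc b; simp [pvExts]
  | cons n ns ih =>
    intro acc b
    by_cases h : n ∈ p <;> simp [h, ih, pvExts]

lemma pvALoop_nil (g : List (Int × List Int)) (f : Nat) (res : List (List Int)) :
    pvALoop g f [] res = res := by
  cases f <;> simp [pvALoop, PySem.List.pop?]

lemma pvVisit_fuel_le (g : List (Int × List Int)) :
    ∀ (ns : List Int) (f : Nat) (p : List Int) (res : List (List Int)) (m : Bool),
      (pvVisit g f p ns res m).1 ≤ f := by
  intro ns
  induction ns with
  | nil => intro f p res m; simp [pvVisit]
  | cons n ns ih =>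
    intro f p res m
    by_cases h : n ∈ p
    · simpa [pvVisit, h] using ih f p res m
    · simp only [pvVisit, h]
      exact le_trans (ih _ _ _ _) (Nat.min_le_right _ _)

lemma pvDfs_fuel_le (g : List (Int × List Int)) (f : Nat) (p : List Int)
    (res : List (List Int)) : (pvDfs g f p res).1 ≤ f := by
  cases f with
  | zero => simp [pvDfs]
  | succ f =>
    rw [pvDfs]
    split
    · simp
    · split
      · simp
      · simpa using le_trans (pvVisit_fuel_le g _ _ _ _ _) (Nat.le_succ f)

lemma pvVisit_flag (g : List (Int × List Int)) :
    ∀ (ns : List Int) (f : Nat) (p : List Int) (res : List (List Int)) (m : Bool),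
      (pvVisit g f p ns res m).2.2 = (m && ns.all (· ∈ p)) := by
  intro ns
  induction ns with
  | nil => intro f p res m; simp [pvVisit]
  | cons n ns ih =>
    intro f p res m
    by_cases h : n ∈ p
    · simp [pvVisit, h, ih]
    · simp [pvVisit, h, ih]

lemma pvVisit_skip (g : List (Int × List Int)) :
    ∀ (ns : List Int) (f : Nat) (p : List Int) (res : List (List Int)) (m : Bool),
      ns.all (· ∈ p) → pvVisit g f p ns res m = (f, res, m) := by
  intro ns
  induction ns with
  | nil => intro f p res m _; simp [pvVisit]
  | cons n ns ih =>
    intro f p res m hall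
    simp only [List.all_cons, Bool.and_eq_true, decide_eq_true_eq] at hall
    simp [pvVisit, hall.1, ih _ _ _ _ (by simpa using hall.2)]

-- stack↔recursion bridge, inner loop: processing the pushed extensions of p (right to left)
-- is B's for-loop over the reversed neighbour list
lemma pvVisit_bridge (g : List (Int × List Int)) (F : Nat)
    (H : ∀ f ≤ F, ∀ (s : List (List Int)) (p : List Int) (res : List (List Int)),
      pvALoop g f (s ++ [p]) res = pvALoop g (pvDfs g f p res).1 s (pvDfs g f p res).2) :
    ∀ (ms : List Int) (f : Nat), f ≤ F → ∀ (s : List (List Int)) (p : List Int)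
      (res : List (List Int)) (m : Bool),
      pvALoop g f (s ++ pvExts p ms.reverse) res
        = pvALoop g (pvVisit g f p ms res m).1 s (pvVisit g f p ms res m).2.1 := by
  intro ms
  induction ms with
  | nil => intro f hf s p res m; simp [pvExts, pvVisit]
  | cons n ns ih =>
    intro f hf s p res m
    by_cases h : n ∈ p
    · have hsk : pvExts p (n :: ns).reverse = pvExts p ns.reverse := by
        simp [pvExts, h]
      rw [hsk, pvVisit, if_pos h]
      exact ih f hf s p res m
    · have hexts : pvExts p (n :: ns).reverse = pvExts p ns.reverse ++ [p ++ [n]] := by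
        simp [pvExts, h]
      rw [hexts, pvVisit, if_neg h, ← List.append_assoc]
      rw [H f hf (s ++ pvExts p ns.reverse) (p ++ [n]) res]
      have hle : (pvDfs g f (p ++ [n]) res).1 ≤ f := pvDfs_fuel_le g f _ res
      simp only [Nat.min_eq_left hle]
      exact ih _ (le_trans hle hf) s p _ false

-- step equations for the two recursions (rw + rfl)
lemma pvALoopN1 (g : List (Int × List Int)) (f : Nat) (s : List (List Int)) (p : List Int)
    (res : List (List Int)) (hg : PySem.List.pyGet? p (-1) = none) :
    pvALoop g (f+1) (s ++ [p]) res = pvALoop g f s res := by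
  rw [pvALoop, PySem.List.pop?_last]; simp only [hg]

lemma pvALoopN2 (g : List (Int × List Int)) (f : Nat) (s : List (List Int)) (p : List Int)
    (res : List (List Int)) (last : Int) (hg : PySem.List.pyGet? p (-1) = some last)
    (hd : (PySem.Dict.mk g).get? last = none) :
    pvALoop g (f+1) (s ++ [p]) res = pvALoop g f s res := by
  rw [pvALoop, PySem.List.pop?_last]; simp only [hg, hd]

lemma pvALoopS (g : List (Int × List Int)) (f : Nat) (s : List (List Int)) (p : List Int)
    (res : List (List Int)) (last : Int) (nbrs : List Int)
    (hg : PySem.List.pyGet? p (-1) = some last)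
    (hd : (PySem.Dict.mk g).get? last = some nbrs) :
    pvALoop g (f+1) (s ++ [p]) res =
      pvALoop g f
        (s ++ (nbrs.foldl (fun (st : List (List Int) × Bool) node =>
            if node ∈ p then st else (st.1 ++ [p ++ [node]], false)) ([], true)).1)
        (if (nbrs.foldl (fun (st : List (List Int) × Bool) node =>
            if node ∈ p then st else (st.1 ++ [p ++ [node]], false)) ([], true)).2
          then res ++ [p] else res) := by
  rw [pvALoop, PySem.List.pop?_last]; simp only [hg, hd]

lemma pvDfsN1 (g : List (Int × List Int)) (f : Nat) (p : List Int)
    (res : List (List Int)) (hg : PySem.List.pyGet? p (-1) = none) :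
    pvDfs g (f+1) p res = (f, res) := by
  rw [pvDfs]; simp only [hg]

lemma pvDfsN2 (g : List (Int × List Int)) (f : Nat) (p : List Int)
    (res : List (List Int)) (last : Int) (hg : PySem.List.pyGet? p (-1) = some last)
    (hd : (PySem.Dict.mk g).get? last = none) :
    pvDfs g (f+1) p res = (f, res) := by
  rw [pvDfs]; simp only [hg, hd]

lemma pvDfsS (g : List (Int × List Int)) (f : Nat) (p : List Int)
    (res : List (List Int)) (last : Int) (nbrs : List Int)
    (hg : PySem.List.pyGet? p (-1) = some last)
    (hd : (PySem.Dict.mk g).get? last = some nbrs) :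
    pvDfs g (f+1) p res =
      ((pvVisit g f p nbrs.reverse res true).1,
        if (pvVisit g f p nbrs.reverse res true).2.2
          then (pvVisit g f p nbrs.reverse res true).2.1 ++ [p]
          else (pvVisit g f p nbrs.reverse res true).2.1) := by
  rw [pvDfs]; simp only [hg, hd]

lemma pvBridge (g : List (Int × List Int)) :
    ∀ (f : Nat) (s : List (List Int)) (p : List Int) (res : List (List Int)),
      pvALoop g f (s ++ [p]) res = pvALoop g (pvDfs g f p res).1 s (pvDfs g f p res).2 := by
  intro f
  induction f using Nat.strong_induction_on with
  | _ f IH =>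
    match f with
    | 0 => intro s p res; simp [pvALoop, pvDfs]
    | Nat.succ f =>
      intro s p res
      rcases hg : PySem.List.pyGet? p (-1) with _ | last
      · rw [pvALoopN1 g f s p res hg, pvDfsN1 g f p res hg]
      · rcases hd : (PySem.Dict.mk g).get? last with _ | nbrs
        · rw [pvALoopN2 g f s p res last hg hd, pvDfsN2 g f p res last hg hd]
        · rw [pvALoopS g f s p res last nbrs hg hd, pvDfsS g f p res last nbrs hg hd]
          simp only [pvAfold_eq p nbrs [] true, Bool.true_and, List.nil_append]
          by_cases hall : nbrs.all (· ∈ p) = true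
          · have hex : pvExts p nbrs = [] := by
              have h' := hall
              simp only [List.all_eq_true, decide_eq_true_eq] at h'
              simp [pvExts, List.filter_eq_nil_iff]
              exact h'
            rw [pvVisit_skip g _ _ _ _ _ (by rwa [List.all_reverse])]
            simp [hall, hex]
          · have hflag : (pvVisit g f p nbrs.reverse res true).2.2 = false := by
              rw [pvVisit_flag]; simpa using hall
            have hmain := pvVisit_bridge g f
              (fun f' hf' => IH f' (Nat.lt_succ_of_le hf')) nbrs.reverse f le_rfl s p res true
            rw [List.reverse_reverse] at hmain
            simp only [hflag] at *
            simpa [hall] using hmain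

-- ===== VERDICT (by name: the statement is the Claim_ definition above) =====
theorem span_graph_spec : Claim_equal_span_graph := by
  intro graph _ _
  unfold Spec_span_graph span_graph span_graph_alt
  cases hm : PySem.List.min? (PySem.Dict.keys (PySem.Dict.mk graph)) (fun x => x) with
  | none => rfl
  | some start =>
    have h := pvBridge graph (pvFuel graph) [] [start] []
    simpa [pvALoop_nil] using h
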